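-- pv_equiv track=rewrite | github.com/linyeh1129/VisionLocator | vision_locator/detect.py | __sort_ai_infos
-- ===== SOURCE A (Python) =====
-- def __sort_ai_infos(infos: list, label_name: str, sort_axis: list, sort_group: int) -> list:
--     infos.sort(key=lambda i: (i[label_name][sort_axis[0]]))
--
--     if sort_group:
--         result = []
--         i = 0
--
--         while i < len(infos):
--             temp = infos[i:i+sort_group]
--             temp.sort(key=lambda i: (i[label_name][sort_axis[1]]))
--             result.extend(temp)
--             i += sort_group
--
--         return result
--     return infos
-- ===== SOURCE B (Python) =====
-- def __sort_ai_infos(infos: list, label_name: str, sort_axis: list, sort_group: int) -> list: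
--     infos.sort(key=lambda i: (i[label_name][sort_axis[0]]))
--
--     if sort_group:
--         order = sorted(enumerate(infos),
--                        key=lambda p: (p[0] // sort_group, p[1][label_name][sort_axis[1]]))
--         return [info for _, info in order]
--     return infos
-- ===== Notes on version B (the rewrite author's own statement) =====
-- stated objective: alternative
-- what changed: Replaces the index-stepping while loop that slices out each sort_group-sized chunk and sorts it separately with one stable global sort of the enumerated axis0-sorted list keyed by (index // sort_group, axis1 value), collected back into a list.
import Mathlib
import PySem

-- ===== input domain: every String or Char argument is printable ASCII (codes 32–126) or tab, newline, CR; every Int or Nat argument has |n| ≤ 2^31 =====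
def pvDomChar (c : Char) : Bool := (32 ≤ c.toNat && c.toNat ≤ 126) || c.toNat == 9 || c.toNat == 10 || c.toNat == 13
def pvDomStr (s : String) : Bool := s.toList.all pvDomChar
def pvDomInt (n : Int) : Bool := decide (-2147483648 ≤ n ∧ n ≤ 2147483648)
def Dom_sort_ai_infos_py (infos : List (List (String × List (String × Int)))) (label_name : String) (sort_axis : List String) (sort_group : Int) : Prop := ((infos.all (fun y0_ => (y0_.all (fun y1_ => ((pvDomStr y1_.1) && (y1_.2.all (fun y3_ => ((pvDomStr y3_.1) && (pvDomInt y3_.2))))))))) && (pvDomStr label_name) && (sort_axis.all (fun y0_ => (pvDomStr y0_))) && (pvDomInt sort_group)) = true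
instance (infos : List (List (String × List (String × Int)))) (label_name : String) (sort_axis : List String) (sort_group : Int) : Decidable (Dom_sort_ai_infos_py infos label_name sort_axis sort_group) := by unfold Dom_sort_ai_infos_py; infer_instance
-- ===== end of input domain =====

-- B replaces A's chunk-slicing while loop by one stable global sort keyed on (index // sort_group, axis1 value); return value proved equal, and both Pythons sort `infos` in place identically (the in-place mutation is the same on both sides).

-- ===== PORT A =====
-- shared key helper: Python's raising `i[label_name][sort_axis_k]` dict lookups, rendered total with
-- getD defaults; exact on Pre_ (which demands the keys be present wherever the lambda is called)
def pvKey (label_name ax : String) (i : List (String × List (String × Int))) : Int :=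
  PySem.Dict.getD (PySem.Dict.mk (PySem.Dict.getD (PySem.Dict.mk i) label_name [])) ax 0

-- sort_axis[k]; exact under Pre_ (index in range wherever evaluated)
def pvAxis (sort_axis : List String) (k : Int) : String :=
  (PySem.List.pyGet? sort_axis k).getD ""

-- A's while loop: state (i, result), slice infos[i:i+sort_group], sort it, extend; fuel only makes
-- the recursion total (length+1 iterations suffice under Pre_'s 0 < sort_group)
def sortAiWhile (s : List (List (String × List (String × Int)))) (key1 : List (String × List (String × Int)) → Int) (g : Int) : Nat → Int → List (List (String × List (String × Int))) → List (List (String × List (String × Int)))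
  | 0, _, result => result
  | fuel+1, i, result =>
    if i < (s.length : Int) then
      sortAiWhile s key1 g fuel (i + g)
        (result ++ PySem.List.sorted (PySem.List.slice s (some i) (some (i + g))) key1)
    else result

def sort_ai_infos_py (infos : List (List (String × List (String × Int)))) (label_name : String) (sort_axis : List String) (sort_group : Int) : List (List (String × List (String × Int))) :=
  let s := PySem.List.sorted infos (pvKey label_name (pvAxis sort_axis 0))
  if sort_group ≠ 0 then
    sortAiWhile s (pvKey label_name (pvAxis sort_axis 1)) sort_group (s.length + 1) 0 []
  else s

-- ===== PORT B =====
def sort_ai_infos_py_alt (infos : List (List (String × List (String × Int)))) (label_name : String) (sort_axis : List String) (sort_group : Int) : List (List (String × List (String × Int))) :=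
  let s := PySem.List.sorted infos (pvKey label_name (pvAxis sort_axis 0))
  if sort_group ≠ 0 then
    (PySem.List.sorted2 (PySem.List.enumerate s 0)
      (fun p => PySem.Int.floordiv p.1 sort_group)
      (fun p => pvKey label_name (pvAxis sort_axis 1) p.2)).map (fun p => p.2)
  else s

-- ===== PRECONDITION & SPEC =====
-- Pre_ excludes exactly the inputs on which A does not return normally: missing label/axis dict keys
-- or a missing sort_axis entry (KeyError/IndexError wherever a sort key lambda is evaluated), and a
-- negative sort_group with nonempty infos (the while loop never terminates there).
def pvHasKey (label_name ax : String) (i : List (String × List (String × Int))) : Prop :=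
  ((PySem.Dict.get? (PySem.Dict.mk i) label_name).bind
    (fun d => PySem.Dict.get? (PySem.Dict.mk d) ax)).isSome = true

def Pre_sort_ai_infos_py (infos : List (List (String × List (String × Int)))) (label_name : String) (sort_axis : List String) (sort_group : Int) : Prop :=
  infos ≠ [] →
    (sort_axis ≠ [] ∧ (∀ i ∈ infos, pvHasKey label_name (pvAxis sort_axis 0) i) ∧
      (sort_group ≠ 0 →
        0 < sort_group ∧ 2 ≤ sort_axis.length ∧
          ∀ i ∈ infos, pvHasKey label_name (pvAxis sort_axis 1) i))

instance (infos : List (List (String × List (String × Int)))) (label_name : String) (sort_axis : List String) (sort_group : Int) : Decidable (Pre_sort_ai_infos_py infos label_name sort_axis sort_group) := by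
  unfold Pre_sort_ai_infos_py pvHasKey; infer_instance

def pvWitness_sort_ai_infos_py : (List (List (String × List (String × Int)))) × String × List String × Int :=
  ([[("l", [("x", 1), ("y", 2)])], [("l", [("x", 0), ("y", 5)])]], "l", ["x", "y"], 1)

def Spec_sort_ai_infos_py (infos : List (List (String × List (String × Int)))) (label_name : String) (sort_axis : List String) (sort_group : Int) (out : List (List (String × List (String × Int)))) : Prop := out = sort_ai_infos_py_alt infos label_name sort_axis sort_group
instance (infos : List (List (String × List (String × Int)))) (label_name : String) (sort_axis : List String) (sort_group : Int) (out : List (List (String × List (String × Int)))) : Decidable (Spec_sort_ai_infos_py infos label_name sort_axis sort_group out) := by unfold Spec_sort_ai_infos_py; infer_instance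

-- ===== CLAIM (what is proved, stated in full; the proofs are below) =====
def Claim_equal_sort_ai_infos_py : Prop := ∀ (infos : List (List (String × List (String × Int)))) (label_name : String) (sort_axis : List String) (sort_group : Int), Dom_sort_ai_infos_py infos label_name sort_axis sort_group → Pre_sort_ai_infos_py infos label_name sort_axis sort_group → Spec_sort_ai_infos_py infos label_name sort_axis sort_group (sort_ai_infos_py infos label_name sort_axis sort_group)

-- ===== LEMMAS AND PROOFS =====

-- abstract chunked form both sides are reduced to (proof-only helper; fuel ≥ length suffices)
def chunkF {α : Type} (key1 : α → Int) (g : Nat) : Nat → List α → List α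
  | _, [] => []
  | 0, _ :: _ => []
  | fuel+1, l@(_ :: _) => PySem.List.sorted (l.take g) key1 ++ chunkF key1 g fuel (l.drop g)

theorem insertBy_append_left {α : Type} (before : α → α → Bool) (x : α) (A acc : List α)
    (h : ∀ y ∈ A, before x y = false) :
    PySem.List.insertBy before x (A ++ acc) = A ++ PySem.List.insertBy before x acc := by
  induction A with
  | nil => rfl
  | cons a A ih =>
      simp [PySem.List.insertBy, h a (by simp), ih (fun y hy => h y (by simp [hy]))]

theorem mem_foldl_insertBy {α : Type} (before : α → α → Bool) (l : List α) (acc : List α)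
    (z : α) (hz : z ∈ List.foldl (fun acc x => PySem.List.insertBy before x acc) acc l) :
    z ∈ acc ∨ z ∈ l := by
  induction l generalizing acc with
  | nil => exact Or.inl hz
  | cons a l ih =>
      rcases ih _ hz with h | h
      · rcases (PySem.List.mem_insertBy before a z acc).1 h with h | h
        · exact Or.inr (by simp [h])
        · exact Or.inl h
      · exact Or.inr (by simp [h])

theorem foldl_insertBy_append_acc {α : Type} (before : α → α → Bool) (l A : List α)
    (h : ∀ x ∈ l, ∀ y ∈ A, before x y = false) (acc : List α) :
    List.foldl (fun acc x => PySem.List.insertBy before x acc) (A ++ acc) l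
      = A ++ List.foldl (fun acc x => PySem.List.insertBy before x acc) acc l := by
  induction l generalizing acc with
  | nil => rfl
  | cons a l ih =>
      simp only [List.foldl_cons]
      rw [insertBy_append_left before a A acc (h a (by simp))]
      exact ih (fun x hx y hy => h x (by simp [hx]) y hy) _

theorem insertBy_congr {α : Type} (before before' : α → α → Bool) (x : α) (acc : List α)
    (h : ∀ y ∈ acc, before x y = before' x y) :
    PySem.List.insertBy before x acc = PySem.List.insertBy before' x acc := by
  induction acc with
  | nil => rfl
  | cons a acc ih =>
      simp only [PySem.List.insertBy, h a (by simp)]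
      rw [ih (fun y hy => h y (by simp [hy]))]

theorem foldl_insertBy_congr {α : Type} (before before' : α → α → Bool) (l acc : List α)
    (h : ∀ x ∈ l, ∀ y, (y ∈ acc ∨ y ∈ l) → before x y = before' x y) :
    List.foldl (fun acc x => PySem.List.insertBy before x acc) acc l
      = List.foldl (fun acc x => PySem.List.insertBy before' x acc) acc l := by
  induction l generalizing acc with
  | nil => rfl
  | cons a l ih =>
      simp only [List.foldl_cons]
      rw [insertBy_congr before before' a acc (fun y hy => h a (by simp) y (Or.inl hy))]
      apply ih
      intro x hx y hy
      apply h x (by simp [hx])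
      rcases hy with hy | hy
      · rcases (PySem.List.mem_insertBy before' a y acc).1 hy with hy | hy
        · exact Or.inr (by simp [hy])
        · exact Or.inl hy
      · exact Or.inr (by simp [hy])

theorem map_snd_insertBy {β : Type} (key1 : β → Int) (p : Int × β) (E : List (Int × β)) :
    (PySem.List.insertBy (fun p q => decide (key1 p.2 < key1 q.2)) p E).map (fun p => p.2)
      = PySem.List.insertBy (fun a b => decide (key1 a < key1 b)) p.2 (E.map (fun p => p.2)) := by
  induction E with
  | nil => rfl
  | cons e E ih =>
      simp only [PySem.List.insertBy, List.map_cons]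
      by_cases hb : key1 p.2 < key1 e.2
      · simp [hb]
      · simp [hb, ih]

theorem map_snd_foldl_insertBy {β : Type} (key1 : β → Int) (E acc : List (Int × β)) :
    (List.foldl (fun acc x => PySem.List.insertBy (fun p q => decide (key1 p.2 < key1 q.2)) x acc) acc E).map (fun p => p.2)
      = List.foldl (fun acc x => PySem.List.insertBy (fun a b => decide (key1 a < key1 b)) x acc) (acc.map (fun p => p.2)) (E.map (fun p => p.2)) := by
  induction E generalizing acc with
  | nil => rfl
  | cons e E ih =>
      simp only [List.foldl_cons, List.map_cons, ih, map_snd_insertBy]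

-- sorted2 of a list whose first key is constant = plain stable sort by the second key, after map snd
theorem map_snd_sorted2_const {α : Type} (k1 : Int × α → Int) (key1 : α → Int)
    (E : List (Int × α)) (c : Int) (hc : ∀ p ∈ E, k1 p = c) :
    (PySem.List.sorted2 E k1 (fun p => key1 p.2)).map (fun p => p.2)
      = PySem.List.sorted (E.map (fun p => p.2)) key1 := by
  simp only [PySem.List.sorted2, PySem.List.sorted]
  rw [foldl_insertBy_congr _ (fun p q => decide (key1 p.2 < key1 q.2)) E []]
  · rw [map_snd_foldl_insertBy]
    rfl
  · intro x hx y hy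
    rcases hy with hy | hy
    · simp at hy
    · simp [hc x hx, hc y hy]

-- stable sort splits over an append when every right element is not-before every left element
theorem sorted2_append_split {α : Type} (k1 : Int × α → Int) (k2 : Int × α → Int)
    (E1 E2 : List (Int × α))
    (h : ∀ x ∈ E2, ∀ y ∈ E1, k1 y < k1 x) :
    PySem.List.sorted2 (E1 ++ E2) k1 k2 = PySem.List.sorted2 E1 k1 k2 ++ PySem.List.sorted2 E2 k1 k2 := by
  simp only [PySem.List.sorted2]
  rw [List.foldl_append]
  have := foldl_insertBy_append_acc
    (fun a b => decide (k1 a < k1 b) || (!decide (k1 b < k1 a) && decide (k2 a < k2 b))) E2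
    (List.foldl (fun acc x => PySem.List.insertBy
      (fun a b => decide (k1 a < k1 b) || (!decide (k1 b < k1 a) && decide (k2 a < k2 b))) x acc) [] E1)
    ?_ []
  · simpa using this
  · intro x hx y hy
    have hy' : y ∈ E1 := by
      rcases mem_foldl_insertBy _ _ _ _ hy with h' | h'
      · simp at h'
      · exact h'
    have := h x hx y hy'
    simp [not_lt.2 (le_of_lt this)]
    omega

-- B-side: the globally keyed sort of the enumeration equals the chunked form
theorem sorted2_enumerate_chunk {α : Type} (key1 : α → Int) (g : Nat) (hg : 0 < g) :
    ∀ (fuel : Nat) (l : List α) (m : Nat), l.length ≤ fuel →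
    (PySem.List.sorted2 (PySem.List.enumerate l ((m * g : Nat) : Int))
        (fun p => PySem.Int.floordiv p.1 (g : Int))
        (fun p => key1 p.2)).map (fun p => p.2)
      = chunkF key1 g fuel l := by
  intro fuel
  induction fuel with
  | zero =>
      intro l m hl
      have : l = [] := List.eq_nil_of_length_eq_zero (Nat.le_zero.1 hl)
      subst this; rfl
  | succ fuel ih =>
      intro l m hl
      match l with
      | [] => rfl
      | a :: t =>
        set l := a :: t with hldef
        have hfd : ∀ (j k : Nat), k < g → PySem.Int.floordiv ((j * g + k : Nat) : Int) (g : Int) = (j : Int) := by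
          intro j k hk
          rw [PySem.Int.floordiv_eq_ediv_of_pos (by exact_mod_cast hg)]
          push_cast
          rw [add_comm, mul_comm, Int.add_mul_ediv_left _ _ (by exact_mod_cast hg.ne')]
          rw [Int.ediv_eq_zero_of_lt (by positivity) (by exact_mod_cast hk)]
          simp
        have hsplit : l = l.take g ++ l.drop g := (List.take_append_drop g l).symm
        conv_lhs => rw [hsplit, PySem.List.enumerate_append]
        have hE1 : ∀ p ∈ PySem.List.enumerate (l.take g) ((m * g : Nat) : Int),
            PySem.Int.floordiv p.1 (g : Int) = (m : Int) := by
          intro p hp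
          rcases (PySem.List.mem_enumerate_iff _ _ _).1 hp with ⟨k, hk, rfl⟩
          have hk' : k < g := lt_of_lt_of_le hk (by simp [List.length_take])
          have : ((m * g : Nat) : Int) + (k : Nat) = ((m * g + k : Nat) : Int) := by push_cast; ring
          rw [this, hfd m k hk']
        rw [sorted2_append_split _ _ _ _ ?hlt]
        case hlt =>
          intro x hx y hy
          rcases (PySem.List.mem_enumerate_iff _ _ _).1 hx with ⟨k, hk, rfl⟩
          have hd : (l.drop g) ≠ [] := by
            intro hnil; rw [hnil] at hk; simp at hk
          have hlen : g < l.length := by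
            by_contra hle
            exact hd (List.drop_eq_nil_of_le (by omega))
          have htake : (l.take g).length = g := by simp [List.length_take]; omega
          rw [hE1 y hy, htake]
          have : ((m * g : Nat) : Int) + (g : Nat) + (k : Nat) = ((k + (m + 1) * g : Nat) : Int) := by push_cast; ring
          simp only [this]
          rw [PySem.Int.floordiv_eq_ediv_of_pos (by exact_mod_cast hg)]
          push_cast
          rw [Int.add_mul_ediv_right _ _ (show (g:Int) ≠ 0 by exact_mod_cast hg.ne')]
          have : (0:Int) ≤ (k : Int) / (g : Int) := Int.ediv_nonneg (by positivity) (by positivity)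
          omega
        rw [List.map_append]
        rw [map_snd_sorted2_const _ key1 _ ((m : Int)) hE1, PySem.List.map_snd_enumerate]
        have htlen : (l.take g).length = min g l.length := by simp [List.length_take]
        have hcast : ((m * g : Nat) : Int) + ((l.take g).length : Int) = (((m + 1) * g : Nat) : Int) ∨ l.drop g = [] := by
          by_cases hlen : g < l.length
          · left; rw [htlen]; push_cast [Nat.min_eq_left (le_of_lt hlen)]; ring
          · right; exact List.drop_eq_nil_of_le (by omega)
        have hchunk : chunkF key1 g (fuel+1) l
            = PySem.List.sorted (l.take g) key1 ++ chunkF key1 g fuel (l.drop g) := by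
          rw [hldef]; rfl
        rw [hchunk]
        congr 1
        rcases hcast with hc | hc
        · rw [hc, ih (l.drop g) (m+1) (by rw [hldef] at hl ⊢; simp at hl ⊢; omega)]
        · rw [hc]
          have hnil : chunkF key1 g fuel ([] : List α) = [] := by cases fuel <;> rfl
          simp [PySem.List.enumerate, PySem.List.sorted2, hnil]

-- A-side: the while loop equals the chunked form
theorem sortAiWhile_chunk (key1 : List (String × List (String × Int)) → Int)
    (s : List (List (String × List (String × Int)))) (g : Int) (hg : 0 < g) :
    ∀ (fuel : Nat) (j : Nat), s.length ≤ j + fuel → ∀ res,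
      sortAiWhile s key1 g fuel ((j : Nat) : Int) res = res ++ chunkF key1 g.toNat fuel (s.drop j) := by
  intro fuel
  induction fuel with
  | zero =>
      intro j hj res
      have : s.drop j = [] := List.drop_eq_nil_of_le (by omega)
      simp [sortAiWhile, this, chunkF]
  | succ fuel ih =>
      intro j hj res
      by_cases hlt : (j : Int) < (s.length : Int)
      · have hjlen : j < s.length := by exact_mod_cast hlt
        rw [sortAiWhile, if_pos hlt]
        have hslice : PySem.List.slice s (some ((j : Nat) : Int)) (some (((j + g.toNat : Nat) : Nat) : Int))
            = (s.drop j).take g.toNat := by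
          rw [PySem.List.slice_natCast]
          congr 1
          omega
        have hjg : (j : Int) + g = ((j + g.toNat : Nat) : Int) := by omega
        rw [hjg, hslice, ih (j + g.toNat) (by omega) _]
        have hd : s.drop j ≠ [] := by
          intro h; have := List.drop_eq_nil_iff.1 h; omega
        have hchunk : chunkF key1 g.toNat (fuel+1) (s.drop j)
            = PySem.List.sorted ((s.drop j).take g.toNat) key1
                ++ chunkF key1 g.toNat fuel ((s.drop j).drop g.toNat) := by
          match hsd : s.drop j with
          | [] => exact absurd hsd hd
          | a :: t => rfl
        rw [hchunk, List.drop_drop, List.append_assoc]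
      · rw [sortAiWhile, if_neg hlt]
        have : s.drop j = [] := List.drop_eq_nil_of_le (by omega)
        simp [this, chunkF]

-- ===== VERDICT (by name: the statement is the Claim_ definition above) =====
theorem sort_ai_infos_py_spec : Claim_equal_sort_ai_infos_py := by
  intro infos label_name sort_axis sort_group _hdom hpre
  unfold Spec_sort_ai_infos_py sort_ai_infos_py sort_ai_infos_py_alt
  by_cases hg : sort_group ≠ 0
  · simp only [if_pos hg]
    set s := PySem.List.sorted infos (pvKey label_name (pvAxis sort_axis 0)) with hs
    by_cases hnil : infos = []
    · subst hnil
      simp [hs, PySem.List.sorted, PySem.List.sorted2, sortAiWhile]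
    · obtain ⟨-, -, hgrp⟩ := hpre hnil
      obtain ⟨hpos, -, -⟩ := hgrp hg
      have hgt : sort_group = ((sort_group.toNat : Nat) : Int) := by omega
      have hA := sortAiWhile_chunk (pvKey label_name (pvAxis sort_axis 1)) s sort_group hpos
        (s.length + 1) 0 (by omega) []
      have hB := sorted2_enumerate_chunk (pvKey label_name (pvAxis sort_axis 1)) sort_group.toNat
        (by omega) (s.length + 1) s 0 (by omega)
      simp only [Nat.cast_zero] at hA
      rw [hA]
      simp only [List.nil_append, List.drop_zero]
      simp only [Nat.zero_mul, Nat.cast_zero] at hB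
      rw [← hgt] at hB
      rw [← hB]
  · simp [hg]
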